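-- pv_equiv track=rewrite | github.com/Casper-Guo/Armchair-Strategist | visualization_funcs.py | reorder_legend
-- ===== SOURCE A (Python) =====
-- relative_compound_labels = ["SOFT", "MEDIUM", "HARD", "INTERMEDIATE", "WET"]
--
-- absolute_compound_labels = ["C1", "C2", "C3", "C4", "C5", "INTERMEDIATE", "WET"]
--
-- def reorder_legend(labels):
--     """
--     Given the list of labels, return a list of int that specifies their appropriate order in the legend
--
--     e.g. labels = ["MEDIUM", "HARD", "SOFT"]
--          desired = ["SOFT", "MEDIUM", "HARD"]
--          return [2, 0, 1]
--
--          labels = ["C3", "C1", "WET"]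
--          desired = ["C1", "C3", "WET"],
--          return [1, 0, 2]
--     """
--
--     order = []
--     old_indices = list(range(len(labels)))
--
--     if "SOFT" in labels or "MEDIUM" in labels or "HARD" in labels:
--         pos = [relative_compound_labels.index(label) if label in relative_compound_labels else -1 for label in labels]
--         order = [old_index for sorted_index, old_index in sorted(zip(pos, old_indices))]
--     else:
--         pos = [absolute_compound_labels.index(label) if label in absolute_compound_labels else -1 for label in labels]
--         order = [old_index for sorted_index, old_index in sorted(zip(pos, old_indices))]
--
--     return order
-- ===== SOURCE B (Python) =====
-- relative_compound_labels = ["SOFT", "MEDIUM", "HARD", "INTERMEDIATE", "WET"]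
--
-- absolute_compound_labels = ["C1", "C2", "C3", "C4", "C5", "INTERMEDIATE", "WET"]
--
--
-- def reorder_legend(labels):
--     """Bucket ordering driven by the target compound order (no comparison sort)."""
--     if "SOFT" in labels or "MEDIUM" in labels or "HARD" in labels:
--         reference = relative_compound_labels
--     else:
--         reference = absolute_compound_labels
--
--     # unknown labels first (they carry position -1), in ascending input order
--     order = [i for i, label in enumerate(labels) if label not in reference]
--     # then each reference compound in its fixed order, matches in input order
--     for compound in reference:
--         order.extend(i for i, label in enumerate(labels) if label == compound)
--     return order
-- ===== Notes on version B (the rewrite author's own statement) =====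
-- stated objective: alternative
-- what changed: Replaces the comparison sort on (position, index) key tuples with a bucket ordering: unknown labels are emitted first in input order, then the reference compound list is walked in its fixed order and matching input indices appended.
import Mathlib
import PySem

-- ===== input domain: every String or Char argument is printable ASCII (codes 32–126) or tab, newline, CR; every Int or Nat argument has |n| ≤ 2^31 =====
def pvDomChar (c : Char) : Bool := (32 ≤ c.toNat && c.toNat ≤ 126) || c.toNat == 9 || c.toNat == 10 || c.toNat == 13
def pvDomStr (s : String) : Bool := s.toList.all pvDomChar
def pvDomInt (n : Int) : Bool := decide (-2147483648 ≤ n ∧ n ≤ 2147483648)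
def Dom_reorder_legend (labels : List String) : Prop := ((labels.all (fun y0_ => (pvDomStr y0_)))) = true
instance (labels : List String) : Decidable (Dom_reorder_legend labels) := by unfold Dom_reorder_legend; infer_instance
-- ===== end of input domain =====

-- B replaces A's comparison sort on (position, index) tuples by a bucket ordering driven by the
-- fixed reference compound list (unknown labels first, then each compound's indices in input order).


-- ===== PORT A =====
def pvRelLabels : List String := ["SOFT", "MEDIUM", "HARD", "INTERMEDIATE", "WET"]

def pvAbsLabels : List String := ["C1", "C2", "C3", "C4", "C5", "INTERMEDIATE", "WET"]

-- `ref.index(label) if label in ref else -1` (index? is none exactly when `label not in ref`)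
def pvPos (ref : List String) (label : String) : Int :=
  match PySem.List.index? ref label with
  | some i => (i : Int)
  | none => -1

def reorder_legend (labels : List String) : List Int :=
  let old_indices := PySem.List.pyRange 0 (labels.length : Int)
  if labels.contains "SOFT" || labels.contains "MEDIUM" || labels.contains "HARD" then
    let pos := labels.map (fun label => pvPos pvRelLabels label)
    (PySem.List.sorted2 (pos.zip old_indices) Prod.fst Prod.snd).map Prod.snd
  else
    let pos := labels.map (fun label => pvPos pvAbsLabels label)
    (PySem.List.sorted2 (pos.zip old_indices) Prod.fst Prod.snd).map Prod.snd

-- ===== PORT B =====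
def reorder_legend_alt (labels : List String) : List Int :=
  let reference :=
    if labels.contains "SOFT" || labels.contains "MEDIUM" || labels.contains "HARD" then
      pvRelLabels
    else
      pvAbsLabels
  let en := PySem.List.enumerate labels
  let order := (en.filter (fun p => !reference.contains p.2)).map Prod.fst
  reference.foldl (fun acc compound => acc ++ (en.filter (fun p => p.2 == compound)).map Prod.fst) order

-- ===== PRECONDITION & SPEC =====
def Spec_reorder_legend (labels : List String) (out : List Int) : Prop := out = reorder_legend_alt labels
instance (labels : List String) (out : List Int) : Decidable (Spec_reorder_legend labels out) := by unfold Spec_reorder_legend; infer_instance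

-- ===== CLAIM (what is proved, stated in full; the proofs are below) =====
def Claim_equal_reorder_legend : Prop := ∀ (labels : List String), Dom_reorder_legend labels → Spec_reorder_legend labels (reorder_legend labels)

-- ===== LEMMAS AND PROOFS =====

-- sorted2 with fst/snd keys is sorting by the lexicographic order on Int × Int
theorem pv_sorted2_eq_sorted_lex (xs : List (Int × Int)) :
    PySem.List.sorted2 xs Prod.fst Prod.snd = PySem.List.sorted xs (fun p => toLex p) := by
  rw [PySem.List.sorted_eq_foldl_insertBy]
  have hcmp : (fun (a b : Int × Int) => decide (a.1 < b.1) || (!decide (b.1 < a.1) && decide (a.2 < b.2)))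
      = (fun (a b : Int × Int) => decide (toLex a < toLex b)) := by
    funext a b
    by_cases h1 : a.1 < b.1 <;> by_cases h2 : b.1 < a.1 <;> by_cases h3 : a.2 < b.2 <;>
      simp [h1, h2, h3, Prod.Lex.lt_iff] <;> omega
  simp only [PySem.List.sorted2, Bool.false_eq_true, if_false, hcmp]

-- enumerate's indices are at least the start value
theorem pv_mem_enumerate_fst_ge {α : Type} (xs : List α) (start : Int) :
    ∀ p ∈ PySem.List.enumerate xs start, start ≤ p.1 := by
  induction xs generalizing start with
  | nil => simp [PySem.List.enumerate]
  | cons x t ih =>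
    intro p hp
    simp only [PySem.List.enumerate, List.mem_cons] at hp
    rcases hp with h | h
    · simp [h]
    · have := ih (start + 1) p h; omega

-- enumerate's indices are strictly increasing
theorem pv_enumerate_pairwise {α : Type} (xs : List α) (start : Int) :
    (PySem.List.enumerate xs start).Pairwise (fun a b => a.1 < b.1) := by
  induction xs generalizing start with
  | nil => simp [PySem.List.enumerate]
  | cons x t ih =>
    simp only [PySem.List.enumerate]
    exact List.Pairwise.cons (fun p hp => by have := pv_mem_enumerate_fst_ge t (start + 1) p hp; omega) (ih (start + 1))

-- zip(map f xs, range(start, start+len)) re-expressed via enumerate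
theorem pv_zip_range_eq_enumerate (f : String → Int) (xs : List String) (start : Int) :
    (xs.map f).zip (PySem.List.pyRange start (start + (xs.length : Int))) =
      (PySem.List.enumerate xs start).map (fun p => (f p.2, p.1)) := by
  induction xs generalizing start with
  | nil => simp [PySem.List.enumerate, PySem.List.pyRange]
  | cons x t ih =>
    have hlt : start < start + (((x :: t).length : Nat) : Int) := by simp only [List.length_cons]; push_cast; omega
    rw [List.map_cons, PySem.List.pyRange_one_cons hlt]
    have harg : start + (((x :: t).length : Nat) : Int) = (start + 1) + (t.length : Int) := by
      simp only [List.length_cons]; push_cast; ring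
    rw [harg]
    simp only [List.zip_cons_cons, PySem.List.enumerate, List.map_cons]
    rw [ih (start + 1)]

-- a member of ref has a nonnegative position
theorem pv_pos_nonneg (ref : List String) (c : String) (h : c ∈ ref) :
    0 ≤ pvPos ref c := by
  unfold pvPos
  cases hidx : PySem.List.index? ref c with
  | some i => simp
  | none => exact absurd h ((PySem.List.index?_eq_none_iff ref c).1 hidx)

-- the lexicographic order on Int pairs, spelled out
theorem pv_lex_lt_iff (a b : Int × Int) : toLex a < toLex b ↔ a.1 < b.1 ∨ (a.1 = b.1 ∧ a.2 < b.2) := by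
  simp [Prod.Lex.lt_iff]

-- labels outside ref have position -1
theorem pv_pos_neg (ref : List String) (c : String) (h : c ∉ ref) :
    pvPos ref c = -1 := by
  unfold pvPos
  rw [(PySem.List.index?_eq_none_iff ref c).2 h]

-- a list is a permutation of (elements with label outside ref) ++ per-ref-element buckets
theorem pv_perm_partition (ref : List String) (hnd : ref.Nodup) (l : List (Int × String)) :
    ((l.filter (fun p => !ref.contains p.2)) ++ ref.flatMap (fun c => l.filter (fun p => p.2 == c))).Perm l := by
  induction ref generalizing l with
  | nil => simp
  | cons c ref' ih =>
    rcases List.nodup_cons.1 hnd with ⟨hc, hnd'⟩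
    have hA : l.filter (fun p => !((c :: ref').contains p.2))
        = (l.filter (fun p => !(p.2 == c))).filter (fun p => !ref'.contains p.2) := by
      rw [List.filter_filter]
      apply List.filter_congr
      intro p _
      by_cases h1 : p.2 = c <;> simp [h1]
    have hB : ref'.flatMap (fun c' => l.filter (fun p => p.2 == c'))
        = ref'.flatMap (fun c' => (l.filter (fun p => !(p.2 == c))).filter (fun p => p.2 == c')) := by
      apply List.flatMap_congr
      intro c' hc'
      rw [List.filter_filter]
      apply List.filter_congr
      intro p _
      by_cases h1 : p.2 = c'
      · have hne : c' ≠ c := by rintro rfl; exact hc hc'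
        simp [h1, hne]
      · simp [h1]
    rw [List.flatMap_cons, hA, hB]
    set l₁ := l.filter (fun p => !(p.2 == c)) with hl₁
    set A := l₁.filter (fun p => !ref'.contains p.2) with hA'
    set B := l.filter (fun p => p.2 == c) with hB'
    set C := ref'.flatMap (fun c' => l₁.filter (fun p => p.2 == c')) with hC'
    have step1 : (A ++ (B ++ C)).Perm (B ++ (A ++ C)) := by
      have h1 : (A ++ B).Perm (B ++ A) := List.perm_append_comm
      simpa [List.append_assoc] using h1.append_right C
    have step2 : (A ++ C).Perm l₁ := ih hnd' l₁
    have step3 : (B ++ l₁).Perm l := List.filter_append_perm (fun p => p.2 == c) l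
    exact step1.trans ((List.Perm.append (List.Perm.refl B) step2).trans step3)

-- constant fst + strictly increasing snd gives lexicographic pairwise
theorem pv_pairwise_lex_of_const_fst (zs : List (Int × Int)) (v : Int)
    (hv : ∀ x ∈ zs, x.1 = v) (hsnd : zs.Pairwise (fun a b => a.2 < b.2)) :
    zs.Pairwise (fun a b => toLex a < toLex b) := by
  refine hsnd.imp_of_mem ?_
  intro a b ha hb hlt
  rw [pv_lex_lt_iff]
  exact Or.inr ⟨(hv a ha).trans (hv b hb).symm, hlt⟩

-- the key equivalence: sorting the (pos, index) pairs lexicographically equals the bucket ordering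
theorem pv_main (ref : List String) (hnd : ref.Nodup)
    (hpw : ref.Pairwise (fun a b => pvPos ref a < pvPos ref b)) (labels : List String) :
    (PySem.List.sorted2 ((labels.map (fun label => pvPos ref label)).zip
        (PySem.List.pyRange 0 (labels.length : Int))) Prod.fst Prod.snd).map Prod.snd
    = ref.foldl (fun acc compound =>
        acc ++ ((PySem.List.enumerate labels).filter (fun p => p.2 == compound)).map Prod.fst)
        (((PySem.List.enumerate labels).filter (fun p => !ref.contains p.2)).map Prod.fst) := by
  set en := PySem.List.enumerate labels with hen
  set g : Int × String → Int × Int := fun p => (pvPos ref p.2, p.1) with hg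
  -- rewrite A's zipped list through enumerate
  have hzip : (labels.map (fun label => pvPos ref label)).zip
      (PySem.List.pyRange 0 (labels.length : Int)) = en.map g := by
    have := pv_zip_range_eq_enumerate (fun label => pvPos ref label) labels 0
    rw [zero_add] at this
    exact this
  -- B's fold as front ++ flatMap of buckets
  rw [hzip, PySem.List.foldl_append_eq_flatMap, pv_sorted2_eq_sorted_lex]
  -- the candidate sorted arrangement, as pairs
  set ys : List (Int × Int) :=
    (en.filter (fun p => !ref.contains p.2)).map g
      ++ ref.flatMap (fun c => (en.filter (fun p => p.2 == c)).map g) with hys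
  -- membership facts
  have hfront : ∀ x ∈ (en.filter (fun p => !ref.contains p.2)).map g, x.1 = -1 := by
    intro x hx
    rcases List.mem_map.1 hx with ⟨p, hp, rfl⟩
    rcases List.mem_filter.1 hp with ⟨_, hnotin⟩
    exact pv_pos_neg ref p.2 (by simpa using hnotin)
  have hbucket : ∀ c, ∀ x ∈ (en.filter (fun p => p.2 == c)).map g, x.1 = pvPos ref c := by
    intro c x hx
    rcases List.mem_map.1 hx with ⟨p, hp, rfl⟩
    rcases List.mem_filter.1 hp with ⟨_, heq⟩
    have : p.2 = c := by simpa using heq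
    simp [hg, this]
  -- increasing snd inside any filtered-and-mapped piece
  have hsnd : ∀ (q : Int × String → Bool),
      ((en.filter q).map g).Pairwise (fun a b => a.2 < b.2) := by
    intro q
    rw [List.pairwise_map]
    exact ((pv_enumerate_pairwise labels 0).filter q).imp (fun h => by simpa [hg] using h)
  -- ys is a permutation of en.map g
  have hperm : ys.Perm (en.map g) := by
    have := (pv_perm_partition ref hnd en).map g
    simpa [hys, List.map_flatMap] using this
  -- ys is strictly increasing lexicographically
  have hpwys : ys.Pairwise (fun a b => toLex a < toLex b) := by
    rw [hys, List.pairwise_append]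
    refine ⟨pv_pairwise_lex_of_const_fst _ (-1) hfront (hsnd _), ?_, ?_⟩
    · rw [List.flatMap_def, List.pairwise_flatten]
      constructor
      · intro zs hzs
        rcases List.mem_map.1 hzs with ⟨c, _, rfl⟩
        exact pv_pairwise_lex_of_const_fst _ (pvPos ref c) (hbucket c) (hsnd _)
      · rw [List.pairwise_map]
        refine hpw.imp_of_mem ?_
        intro c c' _ _ hlt x hx y hy
        rw [pv_lex_lt_iff]
        exact Or.inl (by rw [hbucket c x hx, hbucket c' y hy]; exact hlt)
    · intro a ha b hb
      rcases List.mem_flatMap.1 hb with ⟨c, hcref, hbc⟩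
      rw [pv_lex_lt_iff]
      refine Or.inl ?_
      rw [hfront a ha, hbucket c b hbc]
      have := pv_pos_nonneg ref c hcref
      omega
  -- conclude
  rw [PySem.List.sorted_eq_of_perm_of_pairwise_lt (en.map g) ys (fun p => toLex p) hperm hpwys]
  rw [hys, List.map_append, List.map_flatMap, List.map_map]
  have hgs : Prod.snd ∘ g = Prod.fst := by funext p; rfl
  rw [hgs]
  congr 1
  apply List.flatMap_congr
  intro c _
  rw [List.map_map, hgs]

-- ===== VERDICT (by name: the statement is the Claim_ definition above) =====
theorem reorder_legend_spec : Claim_equal_reorder_legend := by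
  intro labels _
  show reorder_legend labels = reorder_legend_alt labels
  unfold reorder_legend reorder_legend_alt
  by_cases h : (labels.contains "SOFT" || labels.contains "MEDIUM" || labels.contains "HARD") = true
  · simp only [h, if_true]
    exact pv_main pvRelLabels (by decide) (by decide) labels
  · simp only [h]
    exact pv_main pvAbsLabels (by decide) (by decide) labels
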